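-- pv_equiv track=rewrite | github.com/OceanicSix/Python_program | Assignment/parallel_DB_Ass1/q1.py | h_partition
-- ===== SOURCE A (Python) =====
-- def s_hash(x, n):
--     """
--     Define a simple hash function for demonstration
--
--     Arguments:
--     x -- an input record
--     n -- the number of processors
--
--     Return:
--     result -- the hash value of x
--     """
--     result = x % n
--
--     return result
--
-- def h_partition(data, n):
--     """
--     Perform hash data partitioning on data
--
--     Arguments:
--     data -- an input dataset which is a list
--     n -- the number of processors
--
--     Return:
--     result -- the paritioned subsets of D
--     """
--     partitions = {}
--
--     ### START CODE HERE ###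
--     for record in data:
--         hash_value=s_hash(record[1],n)
--         if hash_value not in partitions:
--             partitions[hash_value]=[record]
--         else:
--             partitions[hash_value].append(record)
--     ### END CODE HERE ###
--
--     return partitions
-- ===== SOURCE B (Python) =====
-- def h_partition(data, n):
--     # Two-pass: compute all hash keys once, then build each bucket by a
--     # comprehension over (record, key) pairs, keyed by first-occurrence order.
--     keys = [record[1] % n for record in data]
--     return {k: [r for r, h in zip(data, keys) if h == k]
--             for k in dict.fromkeys(keys)}
-- ===== Notes on version B (the rewrite author's own statement) =====
-- stated objective: alternative
-- what changed: A appends each record into a dict bucket in one pass; B first computes all hash keys, takes the distinct keys in first-occurrence order (dict.fromkeys), and builds each bucket by filtering the zipped (record, key) list.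
import Mathlib
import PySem

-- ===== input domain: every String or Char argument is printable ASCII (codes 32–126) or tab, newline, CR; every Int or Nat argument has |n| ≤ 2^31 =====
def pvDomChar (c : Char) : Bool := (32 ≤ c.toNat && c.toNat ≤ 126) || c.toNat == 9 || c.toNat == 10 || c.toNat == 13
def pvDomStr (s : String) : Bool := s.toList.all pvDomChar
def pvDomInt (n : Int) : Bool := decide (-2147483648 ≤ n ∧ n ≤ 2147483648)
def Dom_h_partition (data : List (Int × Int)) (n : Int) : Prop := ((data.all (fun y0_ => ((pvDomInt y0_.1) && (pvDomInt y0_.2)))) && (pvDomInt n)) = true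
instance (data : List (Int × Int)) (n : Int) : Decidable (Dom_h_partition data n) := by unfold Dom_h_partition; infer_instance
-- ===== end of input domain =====

-- B replaces A's one-pass dict-append loop by a key-precompute + per-distinct-key filter
-- decomposition (alternative structure, same return value).

-- ===== PORT A =====
def s_hash (x : Int) (n : Int) : Int := PySem.Int.mod x n

def h_partition (data : List (Int × Int)) (n : Int) : List (Int × List (Int × Int)) :=
  (data.foldl
    (fun partitions record =>
      let hash_value := s_hash record.2 n
      if ¬ partitions.contains hash_value then
        partitions.insert hash_value [record]
      else
        partitions.insert hash_value (partitions.getD hash_value [] ++ [record]))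
    PySem.Dict.empty).items

-- ===== PORT B =====
def h_partition_alt (data : List (Int × Int)) (n : Int) : List (Int × List (Int × Int)) :=
  let keys := data.map (fun record => PySem.Int.mod record.2 n)
  (PySem.List.dedup keys).map
    (fun k => (k, ((data.zip keys).filter (fun p => p.2 == k)).map (·.1)))

-- ===== PRECONDITION & SPEC =====
-- Pre_ excludes only n = 0, where the Python A raises ZeroDivisionError (x % 0).
def Pre_h_partition (data : List (Int × Int)) (n : Int) : Prop := n ≠ 0
instance (data : List (Int × Int)) (n : Int) : Decidable (Pre_h_partition data n) := by unfold Pre_h_partition; infer_instance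
def pvWitness_h_partition : (List (Int × Int)) × Int := ([(1, 2), (3, 5), (4, 7)], 3)

def Spec_h_partition (data : List (Int × Int)) (n : Int) (out : List (Int × List (Int × Int))) : Prop := out = h_partition_alt data n
instance (data : List (Int × Int)) (n : Int) (out : List (Int × List (Int × Int))) : Decidable (Spec_h_partition data n out) := by unfold Spec_h_partition; infer_instance

-- ===== CLAIM (what is proved, stated in full; the proofs are below) =====
def Claim_equal_h_partition : Prop := ∀ (data : List (Int × Int)) (n : Int), Dom_h_partition data n → Pre_h_partition data n → Spec_h_partition data n (h_partition data n)

-- ===== LEMMAS AND PROOFS =====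

-- A's loop body is exactly Dict.modify with default [] and append.
theorem hp_step_eq_modify (d : PySem.Dict Int (List (Int × Int))) (k : Int) (r : Int × Int) :
    (if ¬ d.contains k then d.insert k [r] else d.insert k (d.getD k [] ++ [r]))
      = d.modify k [] (fun l => l ++ [r]) := by
  by_cases h : d.contains k
  · simp [h, PySem.Dict.modify, PySem.Dict.insert, PySem.Dict.getD, PySem.Dict.get?]
  · have h2 : d.get? k = none := by
      rw [PySem.Dict.get?_eq_none_iff_contains]; simpa using h
    simp [h, h2, PySem.Dict.modify, PySem.Dict.insert, PySem.Dict.getD]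

-- A's loop, rewritten as a foldl of modify over the key of each record.
theorem hp_fold_eq (data : List (Int × Int)) (n : Int) :
    h_partition data n
      = (data.foldl
          (fun d r => d.modify (PySem.Int.mod r.2 n) [] (fun l => l ++ [r]))
          PySem.Dict.empty).items := by
  unfold h_partition
  congr 1
  apply PySem.List.foldl_congr_mem
  intro d r _
  simpa [s_hash] using hp_step_eq_modify d (PySem.Int.mod r.2 n) r

-- grouping fold over (key, value) pairs, characterised by dedup + filter
theorem hp_group_items (L : List (Int × (Int × Int))) :
    ((L.foldl (fun d p => d.modify p.1 [] (fun l => l ++ [p.2])) PySem.Dict.empty).items)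
      = (PySem.List.dedup (L.map (·.1))).map
          (fun k => (k, (L.filter (fun p => p.1 == k)).map (·.2))) := by
  have hnd : (L.foldl (fun d p => d.modify p.1 [] (fun l => l ++ [p.2]))
      PySem.Dict.empty).keys.Nodup :=
    PySem.Dict.nodup_keys_foldl_modify_key L (·.1) [] (fun _ p => fun l => l ++ [p.2])
      PySem.Dict.empty PySem.Dict.nodup_keys_empty
  rw [PySem.Dict.items_eq_map_keys _ hnd []]
  have hkeys : (L.foldl (fun d p => d.modify p.1 [] (fun l => l ++ [p.2]))
      PySem.Dict.empty).keys = PySem.List.dedup (L.map (·.1)) := by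
    rw [PySem.Dict.keys_foldl_modify_key]
    simp [PySem.Set.update_nil_left, PySem.Dict.keys_empty]
  rw [hkeys]
  apply List.map_congr_left
  intro k _
  rw [PySem.Dict.getD_foldl_modify_append]
  simp [PySem.Dict.getD_empty]

-- ===== VERDICT (by name: the statement is the Claim_ definition above) =====
theorem h_partition_spec : Claim_equal_h_partition := by
  intro data n _ _
  unfold Spec_h_partition h_partition_alt
  have h1 : data.foldl (fun d r => d.modify (PySem.Int.mod r.2 n) [] (fun l => l ++ [r]))
        PySem.Dict.empty
      = (data.map (fun r => (PySem.Int.mod r.2 n, r))).foldl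
          (fun d p => d.modify p.1 [] (fun l => l ++ [p.2])) PySem.Dict.empty :=
    by rw [List.foldl_map]
  rw [hp_fold_eq, h1, hp_group_items]
  have hz : data.zip (data.map (fun r => PySem.Int.mod r.2 n))
      = data.map (fun r => (r, PySem.Int.mod r.2 n)) :=
    Eq.symm List.map_prod_left_eq_zip
  simp [hz, List.map_map, List.filter_map, Function.comp_def]
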